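-- pv_equiv track=rewrite | github.com/avinight/csc148-winter-2022 | preps/prep3/mailman.py | prime_combos
-- ===== SOURCE A (Python) =====
-- from typing import List
-- from itertools import combinations
--
-- def find_factors(n: int) -> List[int]:
--     """Precondition n > 1."""
--     factors = []
--     d = 1
--     while d <= n:
--         if n % d == 0:
--             factors.append(d)
--         d += 1
--     return factors
--
-- def prime_combos(n: int):
--     """Return the list of combinations of n."""
--     combos = combinations(find_factors(n), 3)
--     lst = []
--     for combo in combos:
--         a = 1
--         for item in combo:
--             a = a * item
--         if a == n:
--             lst.append(combo)
--     return lst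
-- ===== SOURCE B (Python) =====
-- def prime_combos(n):
--     """Return the list of combinations of n."""
--     divs = []
--     d = 1
--     while d * d <= n:
--         if n % d == 0:
--             divs.append(d)
--             if d != n // d:
--                 divs.append(n // d)
--         d += 1
--     divs.sort()
--     res = []
--     while divs:
--         a = divs[0]
--         divs = divs[1:]
--         for b in divs:
--             ab = a * b
--             if n % ab == 0:
--                 c = n // ab
--                 if b < c:
--                     res.append((a, b, c))
--     return res
-- ===== Notes on version B (the rewrite author's own statement) =====
-- stated objective: faster
-- what changed: B finds divisors in cofactor pairs up to the square root of n and sorts them, then enumerates only pairs (a,b) of divisors and computes the unique third factor n//(a*b) directly, instead of scanning every candidate divisor up to n and testing each triple combination of divisors by multiplying it out.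
import Mathlib
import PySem

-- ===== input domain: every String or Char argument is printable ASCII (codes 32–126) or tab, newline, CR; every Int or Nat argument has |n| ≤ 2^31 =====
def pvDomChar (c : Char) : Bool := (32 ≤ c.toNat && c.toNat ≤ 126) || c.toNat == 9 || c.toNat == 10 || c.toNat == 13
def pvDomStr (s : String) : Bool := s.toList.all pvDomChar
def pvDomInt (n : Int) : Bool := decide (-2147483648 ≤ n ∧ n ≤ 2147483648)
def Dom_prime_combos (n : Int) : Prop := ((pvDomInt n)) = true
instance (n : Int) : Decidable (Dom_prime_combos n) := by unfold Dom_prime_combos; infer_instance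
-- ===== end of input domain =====

-- B replaces A's O(n) divisor scan and 3-combination filter by a sqrt(n) paired divisor
-- search plus a direct computation of the third factor from each divisor pair (objective: faster).

-- ===== PORT A =====
-- the `while d <= n` loop of find_factors
def findFactorsAux (n d : Int) (factors : List Int) : List Int :=
  if _h : d ≤ n then
    findFactorsAux n (d + 1) (if PySem.Int.mod n d == 0 then factors ++ [d] else factors)
  else factors
termination_by (n + 1 - d).toNat
decreasing_by omega

def find_factors (n : Int) : List Int := findFactorsAux n 1 []

def prime_combos (n : Int) : List (List Int) :=
  let combos := PySem.List.combinations (find_factors n) 3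
  combos.foldl (fun lst combo =>
    let a := combo.foldl (fun a item => a * item) 1
    if a == n then lst ++ [combo] else lst) []

-- ===== PORT B =====
-- the `while d * d <= n` loop collecting each small divisor with its cofactor
def collectDivsAux (n d : Int) : List Int :=
  if _h : d * d ≤ n then
    (if PySem.Int.mod n d == 0 then
      [d] ++ (if d != PySem.Int.floordiv n d then [PySem.Int.floordiv n d] else [])
    else []) ++ collectDivsAux n (d + 1)
  else []
termination_by (n + 1 - d).toNat
decreasing_by
  have hdn : d ≤ n := by
    by_cases h0 : d ≤ 0
    · nlinarith [mul_self_nonneg d]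
    · nlinarith
  omega

-- `while divs: a = divs[0]; divs = divs[1:]; for b in divs: ...`
def pairLoopAux (n : Int) : List Int → List (List Int) → List (List Int)
  | [], res => res
  | a :: divs, res =>
    pairLoopAux n divs
      (divs.foldl (fun res b =>
        let ab := a * b
        if PySem.Int.mod n ab == 0 then
          let c := PySem.Int.floordiv n ab
          if b < c then res ++ [[a, b, c]] else res
        else res) res)

def prime_combos_alt (n : Int) : List (List Int) :=
  let divs := PySem.List.sorted (collectDivsAux n 1) (fun x => x) false
  pairLoopAux n divs []

-- ===== PRECONDITION & SPEC =====
def Spec_prime_combos (n : Int) (out : List (List Int)) : Prop := out = prime_combos_alt n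
instance (n : Int) (out : List (List Int)) : Decidable (Spec_prime_combos n out) := by unfold Spec_prime_combos; infer_instance

-- ===== CLAIM (what is proved, stated in full; the proofs are below) =====
def Claim_equal_prime_combos : Prop := ∀ (n : Int), Dom_prime_combos n → Spec_prime_combos n (prime_combos n)

-- ===== LEMMAS AND PROOFS =====

-- A's divisor list: membership characterisation
lemma ffa_mem (n d x : Int) (acc : List Int) :
    x ∈ findFactorsAux n d acc ↔ x ∈ acc ∨ (d ≤ x ∧ x ≤ n ∧ PySem.Int.mod n x = 0) := by
  fun_induction findFactorsAux n d acc with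
  | case1 d acc h ih =>
    simp only [dite_eq_ite] at ih
    rw [ih]
    by_cases hm : PySem.Int.mod n d = 0
    · rw [if_pos (by rw [beq_iff_eq]; exact hm), List.mem_append, List.mem_singleton]
      constructor
      · rintro ((hx | rfl) | ⟨h1, h2, h3⟩)
        · exact Or.inl hx
        · exact Or.inr ⟨le_refl x, h, hm⟩
        · exact Or.inr ⟨by omega, h2, h3⟩
      · rintro (hx | ⟨h1, h2, h3⟩)
        · exact Or.inl (Or.inl hx)
        · rcases eq_or_lt_of_le h1 with rfl | hlt
          · exact Or.inl (Or.inr rfl)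
          · exact Or.inr ⟨by omega, h2, h3⟩
    · rw [if_neg (by rw [beq_iff_eq]; exact hm)]
      constructor
      · rintro (hx | ⟨h1, h2, h3⟩)
        · exact Or.inl hx
        · exact Or.inr ⟨by omega, h2, h3⟩
      · rintro (hx | ⟨h1, h2, h3⟩)
        · exact Or.inl hx
        · refine Or.inr ⟨?_, h2, h3⟩
          rcases eq_or_lt_of_le h1 with rfl | hlt
          · exact absurd h3 hm
          · omega
  | case2 d acc h =>
    constructor
    · exact Or.inl
    · rintro (hx | ⟨h1, h2, -⟩)
      · exact hx
      · omega

lemma ffa_pairwise (n d : Int) (acc : List Int) (hp : acc.Pairwise (· < ·))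
    (hlt : ∀ y ∈ acc, y < d) : (findFactorsAux n d acc).Pairwise (· < ·) := by
  fun_induction findFactorsAux n d acc with
  | case1 d acc h ih =>
    simp only [dite_eq_ite] at ih ⊢
    apply ih
    · split
      · apply List.pairwise_append.2
        refine ⟨hp, by simp, ?_⟩
        intro y hy z hz
        rw [List.mem_singleton] at hz
        exact hz ▸ hlt y hy
      · exact hp
    · intro y hy
      split at hy
      · rcases List.mem_append.1 hy with hy' | hy'
        · have := hlt y hy'; omega
        · rw [List.mem_singleton] at hy'; omega
      · have := hlt y hy; omega
  | case2 d acc h => exact hp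

-- one step of B's collection loop, as pure arithmetic on divisors
lemma step_arith (n d x : Int) (hd : 1 ≤ d) (h : d * d ≤ n) :
    (x ∣ n ∧ 1 ≤ x ∧ ((d ≤ x ∧ x * x ≤ n) ∨ (d * x ≤ n ∧ n < x * x)))
      ↔ ((d ∣ n ∧ (x = d ∨ (x = n / d ∧ d ≠ n / d)))
         ∨ (x ∣ n ∧ 1 ≤ x ∧ ((d + 1 ≤ x ∧ x * x ≤ n) ∨ ((d + 1) * x ≤ n ∧ n < x * x)))) := by
  have hn : 1 ≤ n := by nlinarith
  constructor
  · rintro ⟨hxd, hx1, (⟨hdx, hxx⟩ | ⟨hdx, hxx⟩)⟩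
    · rcases eq_or_lt_of_le hdx with rfl | hlt
      · exact Or.inl ⟨hxd, Or.inl rfl⟩
      · exact Or.inr ⟨hxd, hx1, Or.inl ⟨by omega, hxx⟩⟩
    · by_cases h2 : (d + 1) * x ≤ n
      · exact Or.inr ⟨hxd, hx1, Or.inr ⟨h2, hxx⟩⟩
      · obtain ⟨m, hm⟩ := hxd
        rw [not_le] at h2
        have h3 : d ≤ m := by nlinarith
        have h4 : m < d + 1 := by nlinarith
        have hmd : m = d := by omega
        have hnd : n = d * x := by rw [hm, hmd]; ring
        have hq : n / d = x := by rw [hnd]; exact Int.mul_ediv_cancel_left x (by omega)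
        refine Or.inl ⟨⟨x, hnd⟩, Or.inr ⟨hq.symm, ?_⟩⟩
        rw [hq]
        rintro rfl
        nlinarith
  · rintro (⟨hdn, hcase⟩ | ⟨hxd, hx1, hcase⟩)
    · obtain ⟨k, hk⟩ := hdn
      have hk1 : 1 ≤ k := by nlinarith
      have hndk : n / d = k := by rw [hk]; exact Int.mul_ediv_cancel_left k (by omega)
      rcases hcase with rfl | ⟨hxk, hne⟩
      · exact ⟨⟨k, hk⟩, hd, Or.inl ⟨le_refl x, h⟩⟩
      · rw [hndk] at hxk hne
        have hk' : n = d * x := by rw [hk, hxk]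
        have hne' : d ≠ x := fun hdx => hne (hdx.trans hxk)
        have hx1 : 1 ≤ x := by omega
        have hdx : d < x := lt_of_le_of_ne (by nlinarith) hne'
        refine ⟨⟨d, by rw [hk']; ring⟩, hx1, Or.inr ⟨by omega,
          by nlinarith [mul_lt_mul_of_pos_right hdx (show (0:Int) < x by omega)]⟩⟩
    · rcases hcase with ⟨h1, h2⟩ | ⟨h1, h2⟩
      · exact ⟨hxd, hx1, Or.inl ⟨by omega, h2⟩⟩
      · exact ⟨hxd, hx1, Or.inr ⟨by nlinarith, h2⟩⟩

-- membership in the elements appended by one iteration of B's while loop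
lemma mem_new (n d x : Int) (hd : 0 < d) :
    (x ∈ (if PySem.Int.mod n d == 0 then
            [d] ++ (if d != PySem.Int.floordiv n d then [PySem.Int.floordiv n d] else [])
          else ([] : List Int)))
      ↔ (d ∣ n ∧ (x = d ∨ (x = n / d ∧ d ≠ n / d))) := by
  rw [PySem.Int.floordiv_eq_ediv_of_pos hd]
  by_cases hm : d ∣ n
  · rw [if_pos (by rw [beq_iff_eq, PySem.Int.mod_eq_zero_iff_dvd]; exact hm)]
    by_cases hne : d = n / d
    · rw [if_neg (by simp only [bne_iff_ne, ne_eq, not_not]; exact hne)]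
      simp only [List.append_nil, List.mem_singleton]
      constructor
      · rintro rfl; exact ⟨hm, Or.inl rfl⟩
      · rintro ⟨-, rfl | ⟨rfl, hne2⟩⟩
        · rfl
        · exact absurd hne hne2
    · rw [if_pos (by simp [hne])]
      simp only [List.cons_append, List.nil_append, List.mem_cons, List.mem_singleton,
        List.not_mem_nil, or_false]
      constructor
      · rintro (rfl | rfl)
        · exact ⟨hm, Or.inl rfl⟩
        · exact ⟨hm, Or.inr ⟨rfl, hne⟩⟩
      · rintro ⟨-, rfl | ⟨rfl, -⟩⟩
        · exact Or.inl rfl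
        · exact Or.inr rfl
  · rw [if_neg (by simp only [beq_iff_eq, PySem.Int.mod_eq_zero_iff_dvd]; exact hm)]
    simp [hm]

-- B's paired divisor collection: membership characterisation
lemma cda_mem (n d x : Int) : 1 ≤ d →
    (x ∈ collectDivsAux n d ↔
      x ∣ n ∧ 1 ≤ x ∧ ((d ≤ x ∧ x * x ≤ n) ∨ (d * x ≤ n ∧ n < x * x))) := by
  fun_induction collectDivsAux n d with
  | case1 d h ih =>
    intro hd
    rw [List.mem_append, ih (by omega), mem_new n d x (by omega), step_arith n d x hd h]
  | case2 d h =>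
    intro hd
    simp only [List.not_mem_nil, false_iff]
    rintro ⟨hdvd, hx, (⟨h1, h2⟩ | ⟨h1, h2⟩)⟩
    · nlinarith
    · nlinarith

lemma cda_nodup (n d : Int) : 1 ≤ d → (collectDivsAux n d).Nodup := by
  fun_induction collectDivsAux n d with
  | case1 d h ih =>
    intro hd
    have hdnot : d ∉ collectDivsAux n (d + 1) := by
      rw [cda_mem n (d + 1) d (by omega)]
      rintro ⟨-, -, (⟨h1, -⟩ | ⟨-, h2⟩)⟩
      · omega
      · omega
    apply List.Nodup.append ?_ (ih (by omega)) ?_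
    · split
      · next hmod =>
        split
        · next hb =>
          rw [bne_iff_ne] at hb
          simp [List.nodup_cons, hb]
        · simp
      · simp
    · intro x hx hx2
      rw [mem_new n d x (by omega)] at hx
      obtain ⟨hm, hcase⟩ := hx
      have hk : d * (n / d) = n := Int.mul_ediv_cancel' hm
      rcases hcase with rfl | ⟨rfl, hne⟩
      · exact hdnot hx2
      · have hdk : d < n / d := lt_of_le_of_ne (by nlinarith) hne
        rw [cda_mem n (d + 1) _ (by omega)] at hx2
        obtain ⟨-, hk1, (⟨-, h2⟩ | ⟨h2, -⟩)⟩ := hx2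
        · nlinarith [mul_pos (show (0:Int) < n / d by omega) (show (0:Int) < n / d - d by omega)]
        · nlinarith
  | case2 d h =>
    intro _
    simp

-- the sorted sqrt-divisor list equals A's linear divisor scan
lemma sorted_divs (n : Int) (hn : 1 ≤ n) :
    PySem.List.sorted (collectDivsAux n 1) (fun x => x) false = find_factors n := by
  unfold find_factors
  have hpw : (findFactorsAux n 1 []).Pairwise (· < ·) :=
    ffa_pairwise n 1 [] List.Pairwise.nil (by simp)
  apply PySem.List.sorted_eq_of_perm_of_pairwise_lt
  · rw [List.perm_ext_iff_of_nodup (hpw.imp ne_of_lt) (cda_nodup n 1 le_rfl)]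
    intro x
    rw [ffa_mem, cda_mem n 1 x le_rfl, PySem.Int.mod_eq_zero_iff_dvd]
    simp only [List.not_mem_nil, false_or]
    constructor
    · rintro ⟨h1, h2, h3⟩
      refine ⟨h3, h1, ?_⟩
      by_cases hxx : x * x ≤ n
      · exact Or.inl ⟨h1, hxx⟩
      · exact Or.inr ⟨by omega, by omega⟩
    · rintro ⟨hdvd, hx, (⟨h1, h2⟩ | ⟨h1, h2⟩)⟩
      · exact ⟨hx, by nlinarith, hdvd⟩
      · exact ⟨hx, by omega, hdvd⟩
  · exact hpw

-- B's pair loop, as filter/map over suffixes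
def innerSpec (n a : Int) (L : List Int) : List (List Int) :=
  (L.filter (fun b => PySem.Int.mod n (a * b) == 0 && decide (b < PySem.Int.floordiv n (a * b)))).map
    (fun b => [a, b, PySem.Int.floordiv n (a * b)])

def pairsSpec (n : Int) : List Int → List (List Int)
  | [] => []
  | a :: L => innerSpec n a L ++ pairsSpec n L

lemma inner_foldl (n a : Int) (L : List Int) (res : List (List Int)) :
    L.foldl (fun res b =>
        let ab := a * b
        if PySem.Int.mod n ab == 0 then
          let c := PySem.Int.floordiv n ab
          if b < c then res ++ [[a, b, c]] else res
        else res) res = res ++ innerSpec n a L := by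
  induction L generalizing res with
  | nil => simp [innerSpec]
  | cons b M ih =>
    simp only [List.foldl_cons, ih, innerSpec, List.filter_cons]
    by_cases h1 : (PySem.Int.mod n (a * b) == 0) = true
    · by_cases h2 : b < PySem.Int.floordiv n (a * b)
      · simp [h1, h2, innerSpec]
      · simp [h1, h2, innerSpec]
    · simp [h1, innerSpec]

lemma pairLoop_eq (n : Int) (L : List Int) (res : List (List Int)) :
    pairLoopAux n L res = res ++ pairsSpec n L := by
  induction L generalizing res with
  | nil => simp [pairLoopAux, pairsSpec]
  | cons a L ih => rw [pairLoopAux, inner_foldl, ih, pairsSpec]; simp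

lemma filter_eq_singleton_of_nodup (M : List Int) (c : Int) (h1 : M.Nodup) (h2 : c ∈ M) :
    M.filter (fun x => x == c) = [c] := by
  induction M with
  | nil => cases h2
  | cons y M ih =>
    rcases List.mem_cons.1 h2 with rfl | hm
    · simp only [List.filter_cons, beq_self_eq_true, if_pos]
      have : M.filter (fun x => x == c) = [] := by
        apply List.filter_eq_nil_iff.2
        intro x hx
        simp only [beq_iff_eq]
        exact fun h => (List.nodup_cons.1 h1).1 (h ▸ hx)
      simp [this]
    · have hyc : (y == c) = false := by
        simp only [beq_eq_false_iff_ne]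
        rintro rfl; exact (List.nodup_cons.1 h1).1 hm
      simp only [List.filter_cons, hyc]
      exact ih (List.nodup_cons.1 h1).2 hm

-- the core: in a tail M of divisors all greater than b, exactly one element completes (a,b) to product n
lemma filter_third (n a b : Int) (hn : 1 ≤ n) (ha : 1 ≤ a) (hb : 1 ≤ b) (M : List Int)
    (hnd : M.Nodup) (hgt : ∀ x ∈ M, b < x)
    (hcl : ∀ c, 1 ≤ c → c ≤ n → c ∣ n → b < c → c ∈ M) :
    M.filter (fun x => decide (a * b * x = n)) =
      (if PySem.Int.mod n (a * b) == 0 && decide (b < PySem.Int.floordiv n (a * b))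
       then [PySem.Int.floordiv n (a * b)] else []) := by
  have hab : 0 < a * b := by positivity
  rw [PySem.Int.floordiv_eq_ediv_of_pos hab]
  by_cases hdvd : a * b ∣ n
  · have hmod : (PySem.Int.mod n (a * b) == 0) = true := by
      rw [beq_iff_eq, PySem.Int.mod_eq_zero_iff_dvd]; exact hdvd
    have hc0 : a * b * (n / (a * b)) = n := Int.mul_ediv_cancel' hdvd
    by_cases hbc : b < n / (a * b)
    · rw [if_pos (by simp [hmod, hbc])]
      have hc01 : 1 ≤ n / (a * b) := by omega
      have hc0dvd : n / (a * b) ∣ n := ⟨a * b, by rw [mul_comm (n / (a * b)) (a * b)]; exact hc0.symm⟩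
      have hc0n : n / (a * b) ≤ n := Int.le_of_dvd (by omega) hc0dvd
      have hc0M : n / (a * b) ∈ M := hcl _ hc01 hc0n hc0dvd hbc
      have hpred : M.filter (fun x => decide (a * b * x = n))
          = M.filter (fun x => x == n / (a * b)) := by
        apply List.filter_congr
        intro x _
        by_cases hx0 : x = n / (a * b)
        · simp [hx0, hc0]
        · have hne : a * b * x ≠ n := fun hEq =>
            hx0 (mul_left_cancel₀ (ne_of_gt hab) (by rw [hEq, hc0]))
          simp [hne, hx0]
      rw [hpred]
      exact filter_eq_singleton_of_nodup M _ hnd hc0M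
    · rw [if_neg (by simp [hbc])]
      apply List.filter_eq_nil_iff.2
      intro x hx h'
      rw [decide_eq_true_eq] at h'
      have hxc : x = n / (a * b) := mul_left_cancel₀ (ne_of_gt hab) (by rw [h', hc0])
      exact hbc (hxc ▸ hgt x hx)
  · have hmod : (PySem.Int.mod n (a * b) == 0) = false := by
      rw [beq_eq_false_iff_ne]
      intro hEq
      exact hdvd ((PySem.Int.mod_eq_zero_iff_dvd n (a * b)).1 hEq)
    rw [if_neg (by simp [hmod])]
    apply List.filter_eq_nil_iff.2
    intro x hx h'
    rw [decide_eq_true_eq] at h'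
    exact hdvd ⟨x, h'.symm⟩

lemma inner_filter_eq (n a : Int) (hn : 1 ≤ n) (ha : 1 ≤ a) (L : List Int)
    (hp : L.Pairwise (· < ·)) (hall : ∀ x ∈ L, 1 ≤ x ∧ x ≤ n ∧ x ∣ n)
    (hcl : ∀ c, 1 ≤ c → c ≤ n → c ∣ n → (∃ b ∈ L, b < c) → c ∈ L) :
    ((PySem.List.combinations L 2).map (a :: ·)).filter
        (fun c => c.foldl (fun a item => a * item) 1 == n) = innerSpec n a L := by
  induction L with
  | nil => simp [PySem.List.combinations_nil_succ, innerSpec]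
  | cons b M ih =>
    obtain ⟨hb1, hbn, hbdvd⟩ := hall b (by simp)
    have hgt := (List.pairwise_cons.1 hp).1
    have hM := (List.pairwise_cons.1 hp).2
    have hMnodup : M.Nodup := hM.imp (fun h => ne_of_lt h)
    have hcl' : ∀ c, 1 ≤ c → c ≤ n → c ∣ n → b < c → c ∈ M := by
      intro c h1 h2 h3 h4
      have := hcl c h1 h2 h3 ⟨b, by simp, h4⟩
      rcases List.mem_cons.1 this with rfl | hm
      · omega
      · exact hm
    have hclM : ∀ c, 1 ≤ c → c ≤ n → c ∣ n → (∃ b' ∈ M, b' < c) → c ∈ M := by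
      rintro c h1 h2 h3 ⟨b', hb', hbc'⟩
      exact hcl' c h1 h2 h3 (lt_trans (hgt b' hb') hbc')
    have h2 : PySem.List.combinations (b :: M) 2 =
        (PySem.List.combinations M 1).map (b :: ·) ++ PySem.List.combinations M 2 :=
      PySem.List.combinations_cons_succ b M 1
    rw [h2, List.map_append, List.filter_append, PySem.List.combinations_one,
      List.map_map, List.map_map]
    have hfirst : (M.map (((a :: ·) ∘ (b :: ·)) ∘ fun x => [x])).filter
        (fun c => c.foldl (fun a item => a * item) 1 == n)
        = (M.filter (fun x => decide (a * b * x = n))).map (((a :: ·) ∘ (b :: ·)) ∘ fun x => [x]) := by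
      rw [List.filter_map]
      congr 1
      apply List.filter_congr
      intro x _
      show (([a, b, x].foldl (fun a item => a * item) 1) == n) = decide (a * b * x = n)
      have harith : 1 * a * b * x = a * b * x := by ring
      simp only [List.foldl_cons, List.foldl_nil, harith]
      rw [Bool.eq_iff_iff]
      simp
    rw [hfirst, filter_third n a b hn ha hb1 M hMnodup hgt hcl',
      ih hM (fun x hx => hall x (List.mem_cons_of_mem b hx)) hclM]
    by_cases hq : (PySem.Int.mod n (a * b) == 0
        && decide (b < PySem.Int.floordiv n (a * b))) = true
    · simp [innerSpec, List.filter_cons, hq]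
    · simp [innerSpec, List.filter_cons, hq]

lemma combos_filter_eq (n : Int) (hn : 1 ≤ n) (L : List Int)
    (hp : L.Pairwise (· < ·)) (hall : ∀ x ∈ L, 1 ≤ x ∧ x ≤ n ∧ x ∣ n)
    (hcl : ∀ c, 1 ≤ c → c ≤ n → c ∣ n → (∃ b ∈ L, b < c) → c ∈ L) :
    (PySem.List.combinations L 3).filter
        (fun c => c.foldl (fun a item => a * item) 1 == n) = pairsSpec n L := by
  induction L with
  | nil => simp [pairsSpec, PySem.List.combinations_nil_succ]
  | cons a L ih =>
    rw [PySem.List.combinations_cons_succ, List.filter_append, pairsSpec]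
    have hL := (List.pairwise_cons.1 hp).2
    have haL := (List.pairwise_cons.1 hp).1
    congr 1
    · exact inner_filter_eq n a hn (hall a (by simp)).1 L hL
        (fun x hx => hall x (List.mem_cons_of_mem a hx))
        (fun c h1 h2 h3 ⟨b, hb, hbc⟩ => by
          have := hcl c h1 h2 h3 ⟨b, List.mem_cons_of_mem a hb, hbc⟩
          rcases List.mem_cons.1 this with rfl | h
          · exact absurd (haL b hb) (by omega)
          · exact h)
    · exact ih hL (fun x hx => hall x (List.mem_cons_of_mem a hx))
        (fun c h1 h2 h3 ⟨b, hb, hbc⟩ => by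
          have := hcl c h1 h2 h3 ⟨b, List.mem_cons_of_mem a hb, hbc⟩
          rcases List.mem_cons.1 this with rfl | h
          · exact absurd (haL b hb) (by omega)
          · exact h)

-- A's accumulating product-check loop, as a filter
lemma foldA (n : Int) (l : List (List Int)) (acc : List (List Int)) :
    l.foldl (fun lst combo =>
        let a := combo.foldl (fun a item => a * item) 1
        if a == n then lst ++ [combo] else lst) acc
      = acc ++ l.filter (fun c => c.foldl (fun a item => a * item) 1 == n) := by
  induction l generalizing acc with
  | nil => simp
  | cons c l ih =>
    rw [List.foldl_cons, List.filter_cons, ih]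
    show (if (c.foldl (fun a item => a * item) 1 == n) = true then acc ++ [c] else acc) ++ _ = _
    by_cases hc : (c.foldl (fun a item => a * item) 1 == n) = true
    · rw [if_pos hc, if_pos hc]
      simp
    · rw [if_neg hc, if_neg hc]

-- A's linear scan list: the divisors of n between 1 and n
lemma ffa_props (n : Int) :
    (∀ x ∈ findFactorsAux n 1 [], 1 ≤ x ∧ x ≤ n ∧ x ∣ n) ∧
    (∀ c, 1 ≤ c → c ≤ n → c ∣ n → c ∈ findFactorsAux n 1 []) := by
  constructor
  · intro x hx
    rcases (ffa_mem n 1 x []).1 hx with hx' | ⟨h1, h2, h3⟩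
    · cases hx'
    · exact ⟨h1, h2, (PySem.Int.mod_eq_zero_iff_dvd n x).1 h3⟩
  · intro c h1 h2 h3
    exact (ffa_mem n 1 c []).2 (Or.inr ⟨h1, h2, (PySem.Int.mod_eq_zero_iff_dvd n c).2 h3⟩)

-- ===== VERDICT (by name: the statement is the Claim_ definition above) =====
theorem prime_combos_spec : Claim_equal_prime_combos := by
  intro n _
  unfold Spec_prime_combos prime_combos prime_combos_alt
  by_cases hn : 1 ≤ n
  · rw [sorted_divs n hn, pairLoop_eq, foldA, List.nil_append, List.nil_append]
    exact combos_filter_eq n hn (find_factors n)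
      (ffa_pairwise n 1 [] List.Pairwise.nil (by simp))
      (ffa_props n).1
      (fun c h1 h2 h3 _ => (ffa_props n).2 c h1 h2 h3)
  · have hf : findFactorsAux n 1 [] = [] := by
      rw [findFactorsAux, dif_neg (by omega)]
    have hc : collectDivsAux n 1 = [] := by
      rw [collectDivsAux, dif_neg (by simp only [one_mul]; omega)]
    unfold find_factors
    rw [hf, hc]
    simp [PySem.List.combinations_nil_succ, pairLoopAux, PySem.List.sorted]
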